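-- pv_equiv track=rewrite | github.com/Noor-Nasri/daily-leetcode | 3975-xor-after-range-multiplication-queries-ii/xor-after-range-multiplication-queries-ii.py | groupSmallQueries
-- ===== SOURCE A (Python) =====
-- def groupSmallQueries(queries, maxStep):
--     queryIndsFromStartFromStep = {}
--     for queryInd in range(len(queries)):
--         start, end, step, mult = queries[queryInd]
--         if step not in queryIndsFromStartFromStep:
--             queryIndsFromStartFromStep[step] = {}
--
--         realStart = start % step
--         if realStart not in queryIndsFromStartFromStep[step]:
--             queryIndsFromStartFromStep[step][realStart] = []
--
--         queryIndsFromStartFromStep[step][realStart].append(queryInd)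
--
--     return queryIndsFromStartFromStep
-- ===== SOURCE B (Python) =====
-- def groupSmallQueries(queries, maxStep):
--     # Two-pass grouping: compute each query's (step, start % step) key once,
--     # then build the nested dict per distinct step / residue by comprehensions.
--     keys = [(q[2], q[0] % q[2]) for q in queries]
--     out = {}
--     for step in dict.fromkeys(s for s, _ in keys):
--         residues = dict.fromkeys(r for s, r in keys if s == step)
--         out[step] = {r: [i for i, k in enumerate(keys) if k == (step, r)]
--                      for r in residues}
--     return out
-- ===== Notes on version B (the rewrite author's own statement) =====
-- stated objective: alternative
-- what changed: Replaces the single-pass nested defaultdict-style mutation with a two-pass scheme: precompute every query's (step, start % step) key, order-preserving-dedup the distinct steps and residues, and build the nested dict by comprehensions that rescan the key list per bucket.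
import Mathlib
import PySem

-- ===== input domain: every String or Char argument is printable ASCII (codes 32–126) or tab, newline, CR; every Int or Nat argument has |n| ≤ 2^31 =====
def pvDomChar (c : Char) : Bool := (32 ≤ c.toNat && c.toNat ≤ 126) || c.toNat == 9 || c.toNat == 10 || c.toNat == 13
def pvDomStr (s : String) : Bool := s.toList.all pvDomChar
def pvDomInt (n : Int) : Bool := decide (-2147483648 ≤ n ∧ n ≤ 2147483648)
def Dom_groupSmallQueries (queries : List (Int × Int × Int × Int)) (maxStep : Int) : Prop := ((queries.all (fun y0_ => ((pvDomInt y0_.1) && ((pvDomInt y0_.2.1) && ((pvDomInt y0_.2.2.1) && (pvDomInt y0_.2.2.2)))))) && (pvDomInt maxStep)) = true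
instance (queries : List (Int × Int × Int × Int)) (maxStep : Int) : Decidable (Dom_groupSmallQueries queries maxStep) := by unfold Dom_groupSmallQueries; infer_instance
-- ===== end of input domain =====

-- B replaces the single-pass nested dict mutation by a two-pass build: dedup the
-- distinct steps and residues of the precomputed keys, then assemble each bucket
-- by filtering; an alternative decomposition, not claimed faster.

-- ===== PORT A =====
def groupSmallQueries (queries : List (Int × Int × Int × Int)) (maxStep : Int) : List (Int × List (Int × List Int)) :=
  let d : PySem.Dict Int (PySem.Dict Int (List Int)) :=
    (PySem.List.enumerate queries).foldl (fun d p =>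
      let queryInd := p.1
      let start := p.2.1
      let step := p.2.2.2.1
      let d := if d.contains step then d else d.insert step PySem.Dict.empty
      let realStart := PySem.Int.mod start step
      let inner := d.getD step PySem.Dict.empty
      let inner := if inner.contains realStart then inner else inner.insert realStart ([] : List Int)
      let inner := inner.modify realStart [] (fun l => l ++ [queryInd])
      d.insert step inner) PySem.Dict.empty
  d.items.map (fun p => (p.1, p.2.items))

-- ===== PORT B =====
def groupSmallQueries_alt (queries : List (Int × Int × Int × Int)) (maxStep : Int) : List (Int × List (Int × List Int)) :=
  let keys := queries.map (fun q => (q.2.2.1, PySem.Int.mod q.1 q.2.2.1))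
  let steps := PySem.List.dedup (keys.map (fun k => k.1))
  steps.map (fun step =>
    let residues := PySem.List.dedup ((keys.filter (fun k => k.1 == step)).map (fun k => k.2))
    (step, residues.map (fun r =>
      (r, ((PySem.List.enumerate keys).filter (fun p => p.2 == (step, r))).map (fun p => p.1)))))

-- ===== PRECONDITION & SPEC =====
-- Pre_ excludes queries containing step = 0, on which Python A (start % step) raises ZeroDivisionError.
def Pre_groupSmallQueries (queries : List (Int × Int × Int × Int)) (maxStep : Int) : Prop :=
  ∀ q ∈ queries, q.2.2.1 ≠ 0
instance (queries : List (Int × Int × Int × Int)) (maxStep : Int) : Decidable (Pre_groupSmallQueries queries maxStep) := by unfold Pre_groupSmallQueries; infer_instance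
def pvWitness_groupSmallQueries : (List (Int × Int × Int × Int)) × Int :=
  ([(0, 0, 2, 1), (1, 0, 2, 1), (0, 0, 3, 1), (5, 0, -2, 1)], 5)
def Spec_groupSmallQueries (queries : List (Int × Int × Int × Int)) (maxStep : Int) (out : List (Int × List (Int × List Int))) : Prop := out = groupSmallQueries_alt queries maxStep
instance (queries : List (Int × Int × Int × Int)) (maxStep : Int) (out : List (Int × List (Int × List Int))) : Decidable (Spec_groupSmallQueries queries maxStep out) := by unfold Spec_groupSmallQueries; infer_instance

-- ===== CLAIM (what is proved, stated in full; the proofs are below) =====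
def Claim_equal_groupSmallQueries : Prop := ∀ (queries : List (Int × Int × Int × Int)) (maxStep : Int), Dom_groupSmallQueries queries maxStep → Pre_groupSmallQueries queries maxStep → Spec_groupSmallQueries queries maxStep (groupSmallQueries queries maxStep)

-- ===== LEMMAS AND PROOFS =====

def pvKey (q : Int × Int × Int × Int) : Int × Int := (q.2.2.1, PySem.Int.mod q.1 q.2.2.1)

def pvStep (d : PySem.Dict Int (PySem.Dict Int (List Int))) (p : Int × (Int × Int × Int × Int)) :
    PySem.Dict Int (PySem.Dict Int (List Int)) :=
  let queryInd := p.1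
  let start := p.2.1
  let step := p.2.2.2.1
  let d := if d.contains step then d else d.insert step PySem.Dict.empty
  let realStart := PySem.Int.mod start step
  let inner := d.getD step PySem.Dict.empty
  let inner := if inner.contains realStart then inner else inner.insert realStart ([] : List Int)
  let inner := inner.modify realStart [] (fun l => l ++ [queryInd])
  d.insert step inner

def pvIdxs (ks : List (Int × Int)) (s r : Int) : List Int :=
  ((PySem.List.enumerate ks).filter (fun p => p.2 == (s, r))).map (fun p => p.1)

def pvInner (ks : List (Int × Int)) (s : Int) : List (Int × List Int) :=
  (PySem.List.dedup ((ks.filter (fun k => k.1 == s)).map (fun k => k.2))).map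
    (fun r => (r, pvIdxs ks s r))

def pvOuter (ks : List (Int × Int)) : PySem.Dict Int (PySem.Dict Int (List Int)) :=
  PySem.Dict.mk ((PySem.List.dedup (ks.map (fun k => k.1))).map
    (fun s => (s, PySem.Dict.mk (pvInner ks s))))

theorem pv_append_congr {A : Type} {a b c d : List A} (h1 : a = c) (h2 : b = d) :
    a ++ b = c ++ d := by rw [h1, h2]

theorem pv_mem_dedup {x : Int} {l : List Int} : x ∈ PySem.List.dedup l ↔ x ∈ l := by
  simp [PySem.List.dedup_eq_ofList, PySem.Set.mem_ofList]

theorem pv_dedup_snoc (l : List Int) (x : Int) :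
    PySem.List.dedup (l ++ [x])
      = if x ∈ l then PySem.List.dedup l else PySem.List.dedup l ++ [x] := by
  simp [PySem.List.dedup_eq_ofList, PySem.Set.ofList_append_singleton,
    PySem.Set.add_eq_ite, PySem.Set.mem_ofList]

-- lookup / insert on a dict built as a map over a key list
theorem pv_get?_mkmap {v : Type} (l : List Int) (f : Int -> v) (x : Int) :
    (PySem.Dict.mk (l.map fun s => (s, f s))).get? x = if x ∈ l then some (f x) else none := by
  induction l with
  | nil => simp [PySem.Dict.get?]
  | cons a l ih =>
    rw [List.map_cons, PySem.Dict.get?_mk_cons]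
    by_cases h : a = x
    · simp [h]
    · simp [h, ih, Ne.symm h]

theorem pv_contains_mkmap {v : Type} (l : List Int) (f : Int -> v) (x : Int) :
    (PySem.Dict.mk (l.map fun s => (s, f s))).contains x = decide (x ∈ l) := by
  induction l with
  | nil => simp [PySem.Dict.contains]
  | cons a l ih =>
    simp [PySem.Dict.contains] at ih ⊢
    by_cases h : a = x
    · simp [h]
    · simp [h, ih, Ne.symm h]

theorem pv_getD_mkmap {v : Type} (l : List Int) (f : Int -> v) (x : Int) (d0 : v) :
    (PySem.Dict.mk (l.map fun s => (s, f s))).getD x d0 = if x ∈ l then f x else d0 := by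
  rw [PySem.Dict.getD_eq_get?_getD, pv_get?_mkmap]
  by_cases h : x ∈ l <;> simp [h]

theorem pv_insert_mkmap_mem {v : Type} (l : List Int) (f : Int -> v) (x : Int) (w : v)
    (hx : x ∈ l) :
    (PySem.Dict.mk (l.map fun s => (s, f s))).insert x w
      = PySem.Dict.mk (l.map fun s => (s, if s = x then w else f s)) := by
  rw [PySem.Dict.insert, pv_contains_mkmap]
  simp only [hx, decide_true, if_true, List.map_map]
  congr 1
  apply List.map_congr_left
  intro a _
  by_cases h : a = x <;> simp [h]

theorem pv_insert_mkmap_not_mem {v : Type} (l : List Int) (f : Int -> v) (x : Int) (w : v)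
    (hx : x ∉ l) :
    (PySem.Dict.mk (l.map fun s => (s, f s))).insert x w
      = PySem.Dict.mk ((l.map fun s => (s, f s)) ++ [(x, w)]) := by
  rw [PySem.Dict.insert, pv_contains_mkmap]
  simp [hx]

-- the one-query update of A's loop, in insert form
theorem pv_step_eq (d : PySem.Dict Int (PySem.Dict Int (List Int))) (n : Int)
    (q : Int × Int × Int × Int) :
    pvStep d (n, q) =
      d.insert q.2.2.1
        ((d.getD q.2.2.1 PySem.Dict.empty).insert (PySem.Int.mod q.1 q.2.2.1)
          ((d.getD q.2.2.1 PySem.Dict.empty).getD (PySem.Int.mod q.1 q.2.2.1) [] ++ [n])) := by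
  unfold pvStep PySem.Dict.modify
  by_cases hs : d.contains q.2.2.1
  · simp only [hs, if_true]
    by_cases hr : (d.getD q.2.2.1 PySem.Dict.empty).contains (PySem.Int.mod q.1 q.2.2.1)
    · simp [hr]
    · have h0 : (d.getD q.2.2.1 PySem.Dict.empty).getD (PySem.Int.mod q.1 q.2.2.1)
          ([] : List Int) = [] := by
        exact PySem.Dict.getD_of_not_contains _ _ (by simpa using hr)
      simp [hr, h0, PySem.Dict.getD_insert_self, PySem.Dict.insert_insert_self]
  · have hgb : d.getD q.2.2.1 PySem.Dict.empty = PySem.Dict.empty := by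
      exact PySem.Dict.getD_of_not_contains _ _ (by simpa using hs)
    simp [hs, hgb, PySem.Dict.getD_insert_self, PySem.Dict.insert_insert_self,
      PySem.Dict.contains_empty, PySem.Dict.getD_empty]

theorem pv_enumerate_snoc {A : Type} (ks : List A) (k : A) :
    PySem.List.enumerate (ks ++ [k]) = PySem.List.enumerate ks ++ [((ks.length : Int), k)] := by
  rw [PySem.List.enumerate_append]
  simp [PySem.List.enumerate_cons, PySem.List.enumerate_nil]

theorem pv_idxs_snoc_ne (ks : List (Int × Int)) (s r s' r' : Int) (h : (s, r) ≠ (s', r')) :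
    pvIdxs (ks ++ [(s, r)]) s' r' = pvIdxs ks s' r' := by
  unfold pvIdxs
  rw [pv_enumerate_snoc]
  simp [List.filter_append, h]

theorem pv_idxs_snoc_self (ks : List (Int × Int)) (s r : Int) :
    pvIdxs (ks ++ [(s, r)]) s r = pvIdxs ks s r ++ [(ks.length : Int)] := by
  unfold pvIdxs
  rw [pv_enumerate_snoc]
  simp [List.filter_append]

theorem pv_idxs_nil_of_not_mem (ks : List (Int × Int)) (s r : Int) (h : (s, r) ∉ ks) :
    pvIdxs ks s r = [] := by
  unfold pvIdxs
  rw [List.map_eq_nil_iff, List.filter_eq_nil_iff]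
  intro p hp
  have h2 : p.2 ∈ (PySem.List.enumerate ks).map (fun q => q.2) := List.mem_map.mpr ⟨p, hp, rfl⟩
  rw [PySem.List.map_snd_enumerate] at h2
  simp only [beq_iff_eq]
  intro he
  exact h (he ▸ h2)

theorem pv_inner_snoc_ne (ks : List (Int × Int)) (s r s' : Int) (h : s' ≠ s) :
    pvInner (ks ++ [(s, r)]) s' = pvInner ks s' := by
  unfold pvInner
  rw [List.filter_append]
  have h0 : [(s, r)].filter (fun k => k.1 == s') = [] := by simp [Ne.symm h]
  rw [h0, List.append_nil]
  apply List.map_congr_left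
  intro r' _
  rw [pv_idxs_snoc_ne ks s r s' r' (fun hc => h (congrArg Prod.fst hc).symm)]

theorem pv_mem_residues (ks : List (Int × Int)) (s r : Int) (h : (s, r) ∈ ks) :
    r ∈ (ks.filter (fun k => k.1 == s)).map (fun k => k.2) :=
  List.mem_map.mpr ⟨(s, r), List.mem_filter.mpr ⟨h, by simp⟩, rfl⟩

-- the heart: appending one key to the grouped structure
theorem pv_outer_snoc (ks : List (Int × Int)) (s r : Int) :
    (pvOuter ks).insert s
      (((pvOuter ks).getD s PySem.Dict.empty).insert r
        (((pvOuter ks).getD s PySem.Dict.empty).getD r [] ++ [(ks.length : Int)]))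
      = pvOuter (ks ++ [(s, r)]) := by
  by_cases hs : s ∈ ks.map (fun k => k.1)
  · -- step already present
    have hsd : s ∈ PySem.List.dedup (ks.map (fun k => k.1)) := pv_mem_dedup.mpr hs
    have hget : (pvOuter ks).getD s PySem.Dict.empty = PySem.Dict.mk (pvInner ks s) := by
      unfold pvOuter; rw [pv_getD_mkmap, if_pos hsd]
    have hKd : PySem.List.dedup ((ks ++ [(s, r)]).map (fun k => k.1))
        = PySem.List.dedup (ks.map (fun k => k.1)) := by
      simp only [List.map_append, List.map_cons, List.map_nil]
      rw [pv_dedup_snoc, if_pos hs]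
    have hfilter : (ks ++ [(s, r)]).filter (fun k => k.1 == s)
        = ks.filter (fun k => k.1 == s) ++ [(s, r)] := by
      simp [List.filter_append]
    have hinner : (PySem.Dict.mk (pvInner ks s)).insert r
          ((PySem.Dict.mk (pvInner ks s)).getD r [] ++ [(ks.length : Int)])
        = PySem.Dict.mk (pvInner (ks ++ [(s, r)]) s) := by
      have hpg : (PySem.Dict.mk (pvInner ks s)).getD r []
          = if r ∈ PySem.List.dedup ((ks.filter (fun k => k.1 == s)).map (fun k => k.2))
            then pvIdxs ks s r else [] := by
        unfold pvInner; rw [pv_getD_mkmap]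
      by_cases hr : r ∈ (ks.filter (fun k => k.1 == s)).map (fun k => k.2)
      · have hrd : r ∈ PySem.List.dedup ((ks.filter (fun k => k.1 == s)).map (fun k => k.2)) :=
          pv_mem_dedup.mpr hr
        have h2 : pvInner (ks ++ [(s, r)]) s
            = (PySem.List.dedup ((ks.filter (fun k => k.1 == s)).map (fun k => k.2))).map
                (fun r' => (r', if r' = r then pvIdxs ks s r ++ [(ks.length : Int)]
                  else pvIdxs ks s r')) := by
          unfold pvInner
          rw [hfilter]
          simp only [List.map_append, List.map_cons, List.map_nil]
          rw [pv_dedup_snoc, if_pos hr]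
          apply List.map_congr_left
          intro r' hr'
          by_cases h : r' = r
          · subst h; rw [pv_idxs_snoc_self, if_pos rfl]
          · rw [if_neg h,
              pv_idxs_snoc_ne ks s r s r' (fun hc => h (congrArg Prod.snd hc).symm)]
        rw [hpg, if_pos hrd, h2]
        unfold pvInner
        rw [pv_insert_mkmap_mem _ _ _ _ hrd]
      · have hrd : r ∉ PySem.List.dedup ((ks.filter (fun k => k.1 == s)).map (fun k => k.2)) :=
          fun hc => hr (pv_mem_dedup.mp hc)
        have hidx0 : pvIdxs ks s r = [] :=
          pv_idxs_nil_of_not_mem ks s r (fun hm => hr (pv_mem_residues ks s r hm))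
        have h2 : pvInner (ks ++ [(s, r)]) s
            = pvInner ks s ++ [(r, [] ++ [(ks.length : Int)])] := by
          unfold pvInner
          rw [hfilter]
          simp only [List.map_append, List.map_cons, List.map_nil]
          rw [pv_dedup_snoc, if_neg hr, List.map_append]
          apply pv_append_congr
          · apply List.map_congr_left
            intro r' hr'
            have hne : r' ≠ r := fun hc => hrd (hc ▸ hr')
            rw [pv_idxs_snoc_ne ks s r s r' (fun hc => hne (congrArg Prod.snd hc).symm)]
          · simp [pv_idxs_snoc_self, hidx0]
        rw [hpg, if_neg hrd, h2]
        unfold pvInner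
        rw [pv_insert_mkmap_not_mem _ _ _ _ hrd]
    rw [hget, hinner]
    unfold pvOuter
    rw [pv_insert_mkmap_mem _ _ _ _ hsd, hKd]
    congr 1
    apply List.map_congr_left
    intro s' hs'
    by_cases h : s' = s
    · subst h; rw [if_pos rfl]
    · rw [if_neg h, pv_inner_snoc_ne ks s r s' h]
  · -- brand-new step
    have hsd : s ∉ PySem.List.dedup (ks.map (fun k => k.1)) := fun hc => hs (pv_mem_dedup.mp hc)
    have hget : (pvOuter ks).getD s PySem.Dict.empty = PySem.Dict.empty := by
      unfold pvOuter; rw [pv_getD_mkmap, if_neg hsd]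
    have hnotmem : (s, r) ∉ ks := fun hmem => hs (List.mem_map.mpr ⟨(s, r), hmem, rfl⟩)
    have hfilter0 : ks.filter (fun k => k.1 == s) = [] := by
      rw [List.filter_eq_nil_iff]
      intro p hp
      simp only [beq_iff_eq]
      exact fun hpe => hs (List.mem_map.mpr ⟨p, hp, hpe⟩)
    have hidx0 : pvIdxs ks s r = [] := pv_idxs_nil_of_not_mem ks s r hnotmem
    have hpvi : pvInner (ks ++ [(s, r)]) s = [(r, [] ++ [(ks.length : Int)])] := by
      unfold pvInner
      rw [List.filter_append, hfilter0, List.nil_append]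
      have h0 : [(s, r)].filter (fun k => k.1 == s) = [(s, r)] := by simp
      rw [h0]
      simp only [List.map_cons, List.map_nil]
      rw [show PySem.List.dedup [r] = [r] from by
        rw [PySem.List.dedup_eq_ofList]
        exact PySem.Set.ofList_eq_self_of_nodup _ (List.nodup_singleton r)]
      simp [pv_idxs_snoc_self, hidx0]
    have hinner : PySem.Dict.empty.insert r
          (PySem.Dict.empty.getD r ([] : List Int) ++ [(ks.length : Int)])
        = PySem.Dict.mk (pvInner (ks ++ [(s, r)]) s) := by
      rw [hpvi]
      rfl
    have hKd : PySem.List.dedup ((ks ++ [(s, r)]).map (fun k => k.1))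
        = PySem.List.dedup (ks.map (fun k => k.1)) ++ [s] := by
      simp only [List.map_append, List.map_cons, List.map_nil]
      rw [pv_dedup_snoc, if_neg hs]
    rw [hget, hinner]
    unfold pvOuter
    rw [pv_insert_mkmap_not_mem _ _ _ _ hsd, hKd, List.map_append]
    congr 1
    apply pv_append_congr
    · apply List.map_congr_left
      intro s' hs'
      have h : s' ≠ s := fun hc => hs (hc ▸ pv_mem_dedup.mp hs')
      rw [pv_inner_snoc_ne ks s r s' h]
    · simp

theorem pv_main (qs : List (Int × Int × Int × Int)) :
    (PySem.List.enumerate qs).foldl pvStep PySem.Dict.empty = pvOuter (qs.map pvKey) := by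
  induction qs using List.reverseRecOn with
  | nil => rfl
  | append_singleton qs q ih =>
    rw [pv_enumerate_snoc, List.foldl_append]
    simp only [List.foldl_cons, List.foldl_nil]
    rw [ih, pv_step_eq]
    have h := pv_outer_snoc (qs.map pvKey) q.2.2.1 (PySem.Int.mod q.1 q.2.2.1)
    simp only [List.length_map] at h
    rw [h]
    simp [pvKey]

-- ===== VERDICT (by name: the statement is the Claim_ definition above) =====
theorem groupSmallQueries_spec : Claim_equal_groupSmallQueries := by
  intro queries maxStep _ _
  unfold Spec_groupSmallQueries groupSmallQueries groupSmallQueries_alt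
  show ((PySem.List.enumerate queries).foldl pvStep PySem.Dict.empty).items.map
      (fun p => (p.1, p.2.items)) = _
  rw [pv_main]
  unfold pvOuter pvKey pvInner pvIdxs
  simp [List.map_map, Function.comp]
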